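-- pv_equiv track=rewrite | github.com/1234224576/MyTopCoder | coupon.py | selectOptimumCoupon
-- ===== SOURCE A (Python) =====
-- def selectOptimumCoupon(total,fiveCoupon,twoCoupon,oneCoupon):
-- 	if(total <= 1000): return (0,0,0)
--
-- 	minVal = total
-- 	result = []
--
-- 	for i in range(fiveCoupon+1):
-- 		for j in range(twoCoupon+1):
-- 			for k in range(oneCoupon+1):
-- 				t = total - (i*500 + j*200 + k*100)
-- 				if(t <= 0): continue
-- 				if(t != minVal and minVal > t):
-- 					result = []
-- 				if(t <= total and minVal >= t):
-- 					minVal = t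
-- 					result.append((i,j,k))
-- 	ans = result[0]
-- 	for x in result:
-- 		if sum(ans) > sum(x):
-- 			ans = x
-- 	return ans
-- ===== SOURCE B (Python) =====
-- def selectOptimumCoupon(total, fiveCoupon, twoCoupon, oneCoupon):
--     if total <= 1000:
--         return (0, 0, 0)
--     # best = (remaining, i, j, k); for each (i, j) the optimal k is computed
--     # directly in closed form, so no loop over k is needed.
--     best = None
--     for i in range(fiveCoupon + 1):
--         remi = total - 500 * i
--         for j in range(twoCoupon + 1):
--             rem = remi - 200 * j
--             if rem <= 0:
--                 continue
--             k = min(oneCoupon, (rem - 1) // 100)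
--             t = rem - 100 * k
--             if best is None or t < best[0] or (t == best[0] and i + j + k < best[1] + best[2] + best[3]):
--                 best = (t, i, j, k)
--     return (best[1], best[2], best[3])
-- ===== Notes on version B (the rewrite author's own statement) =====
-- stated objective: alternative
-- what changed: The innermost loop over oneCoupon is eliminated: for each (i,j) the optimal k is computed in closed form as min(oneCoupon,(rem-1)//100), and instead of accumulating a list of tied candidates and scanning it afterwards, a single running best (minimal remainder, then minimal coupon count, first in lex order) is maintained.
import Mathlib
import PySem

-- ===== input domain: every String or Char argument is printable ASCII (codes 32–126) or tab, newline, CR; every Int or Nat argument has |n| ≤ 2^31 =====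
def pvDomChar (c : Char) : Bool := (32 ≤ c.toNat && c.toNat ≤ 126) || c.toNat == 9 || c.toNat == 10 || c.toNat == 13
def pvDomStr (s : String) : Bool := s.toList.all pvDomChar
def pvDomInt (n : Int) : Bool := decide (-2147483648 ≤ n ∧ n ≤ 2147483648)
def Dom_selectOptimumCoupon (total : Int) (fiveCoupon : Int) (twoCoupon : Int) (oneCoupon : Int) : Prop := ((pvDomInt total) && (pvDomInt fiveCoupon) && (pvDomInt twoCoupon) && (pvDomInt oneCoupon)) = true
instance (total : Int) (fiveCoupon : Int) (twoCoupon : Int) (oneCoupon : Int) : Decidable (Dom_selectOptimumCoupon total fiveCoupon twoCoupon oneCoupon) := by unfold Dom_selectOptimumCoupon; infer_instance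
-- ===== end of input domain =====

-- B removes A's innermost k-loop (the best k per (i,j) is computed in closed form) and replaces
-- A's candidate list + final scan by a single running best: a different algorithm, same result.

-- ===== PORT A =====
-- body of A's innermost k-loop
def pvStepK (total i j : Int) (s : Int × List (Int × Int × Int)) (k : Int) :
    Int × List (Int × Int × Int) :=
  let t := total - (i * 500 + j * 200 + k * 100)
  if t ≤ 0 then s
  else
    let s1 := if t ≠ s.1 ∧ s.1 > t then (s.1, ([] : List (Int × Int × Int))) else s
    if t ≤ total ∧ s1.1 ≥ t then (t, s1.2 ++ [(i, j, k)]) else s1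

-- body of A's j-loop: runs the k-loop
def pvStepJ (total oneCoupon i : Int) (s : Int × List (Int × Int × Int)) (j : Int) :
    Int × List (Int × Int × Int) :=
  (PySem.List.pyRange 0 (oneCoupon + 1) 1).foldl (pvStepK total i j) s

-- body of A's i-loop: runs the j-loop
def pvStepI (total twoCoupon oneCoupon : Int) (s : Int × List (Int × Int × Int)) (i : Int) :
    Int × List (Int × Int × Int) :=
  (PySem.List.pyRange 0 (twoCoupon + 1) 1).foldl (pvStepJ total oneCoupon i) s

-- body of A's final selection loop ('if sum(ans) > sum(x): ans = x')
def pvPick (ans x : Int × Int × Int) : Int × Int × Int :=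
  if ans.1 + ans.2.1 + ans.2.2 > x.1 + x.2.1 + x.2.2 then x else ans

def selectOptimumCoupon (total : Int) (fiveCoupon : Int) (twoCoupon : Int) (oneCoupon : Int) : List Int :=
  if total ≤ 1000 then [0, 0, 0]
  else
    let st := (PySem.List.pyRange 0 (fiveCoupon + 1) 1).foldl
      (pvStepI total twoCoupon oneCoupon) (total, ([] : List (Int × Int × Int)))
    match st.2 with
    | [] => []  -- Python raises IndexError on result[0] here; excluded by Pre_
    | r0 :: rest =>
      let ans := (r0 :: rest).foldl pvPick r0
      [ans.1, ans.2.1, ans.2.2]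

-- ===== PORT B =====
-- body of B's j-loop: closed-form best k for this (i, j), running best update
def pvBStepJ (oneCoupon i remi : Int) (s : Option (Int × Int × Int × Int)) (j : Int) :
    Option (Int × Int × Int × Int) :=
  let rem := remi - 200 * j
  if rem ≤ 0 then s
  else
    let k := min oneCoupon (PySem.Int.floordiv (rem - 1) 100)
    let t := rem - 100 * k
    match s with
    | none => some (t, i, j, k)
    | some b =>
      if t < b.1 ∨ (t = b.1 ∧ i + j + k < b.2.1 + b.2.2.1 + b.2.2.2) then some (t, i, j, k)
      else some b

-- body of B's i-loop
def pvBStepI (total twoCoupon oneCoupon : Int) (s : Option (Int × Int × Int × Int)) (i : Int) :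
    Option (Int × Int × Int × Int) :=
  let remi := total - 500 * i
  (PySem.List.pyRange 0 (twoCoupon + 1) 1).foldl (pvBStepJ oneCoupon i remi) s

def selectOptimumCoupon_alt (total : Int) (fiveCoupon : Int) (twoCoupon : Int) (oneCoupon : Int) : List Int :=
  if total ≤ 1000 then [0, 0, 0]
  else
    match (PySem.List.pyRange 0 (fiveCoupon + 1) 1).foldl
      (pvBStepI total twoCoupon oneCoupon) none with
    | none => []  -- Python raises TypeError on best[1] here; excluded by Pre_
    | some b => [b.2.1, b.2.2.1, b.2.2.2]

-- ===== PRECONDITION & SPEC =====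
-- Pre_ excludes only inputs where A raises: with total > 1000 and a negative coupon count some
-- range() is empty, result stays [] and result[0] raises IndexError.
def Pre_selectOptimumCoupon (total : Int) (fiveCoupon : Int) (twoCoupon : Int) (oneCoupon : Int) : Prop :=
  total ≤ 1000 ∨ (0 ≤ fiveCoupon ∧ 0 ≤ twoCoupon ∧ 0 ≤ oneCoupon)
instance (total : Int) (fiveCoupon : Int) (twoCoupon : Int) (oneCoupon : Int) : Decidable (Pre_selectOptimumCoupon total fiveCoupon twoCoupon oneCoupon) := by unfold Pre_selectOptimumCoupon; infer_instance

def pvWitness_selectOptimumCoupon : Int × Int × Int × Int := (1800, 2, 1, 3)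

def Spec_selectOptimumCoupon (total : Int) (fiveCoupon : Int) (twoCoupon : Int) (oneCoupon : Int) (out : List Int) : Prop := out = selectOptimumCoupon_alt total fiveCoupon twoCoupon oneCoupon
instance (total : Int) (fiveCoupon : Int) (twoCoupon : Int) (oneCoupon : Int) (out : List Int) : Decidable (Spec_selectOptimumCoupon total fiveCoupon twoCoupon oneCoupon out) := by unfold Spec_selectOptimumCoupon; infer_instance

-- ===== CLAIM (what is proved, stated in full; the proofs are below) =====
def Claim_equal_selectOptimumCoupon : Prop := ∀ (total : Int) (fiveCoupon : Int) (twoCoupon : Int) (oneCoupon : Int), Dom_selectOptimumCoupon total fiveCoupon twoCoupon oneCoupon → Pre_selectOptimumCoupon total fiveCoupon twoCoupon oneCoupon → Spec_selectOptimumCoupon total fiveCoupon twoCoupon oneCoupon (selectOptimumCoupon total fiveCoupon twoCoupon oneCoupon)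

-- ===== LEMMAS AND PROOFS =====

-- abstract per-(i,j) update of A's state: what the whole k-loop does
def pvApplyA (total oneCoupon i j : Int) (s : Int × List (Int × Int × Int)) :
    Int × List (Int × Int × Int) :=
  let rem := total - 500 * i - 200 * j
  if rem ≤ 0 then s
  else
    let k := min oneCoupon (PySem.Int.floordiv (rem - 1) 100)
    let t := rem - 100 * k
    if t < s.1 then (t, [(i, j, k)])
    else if t = s.1 then (s.1, s.2 ++ [(i, j, k)])
    else s

-- A's final selection over the candidate list
def pvSel (r0 : Int × Int × Int) (rest : List (Int × Int × Int)) : Int × Int × Int :=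
  rest.foldl pvPick r0

-- state correspondence between the two programs
def pvInv (total : Int) (sA : Int × List (Int × Int × Int))
    (sB : Option (Int × Int × Int × Int)) : Prop :=
  (sA.2 = [] ∧ sA.1 = total ∧ sB = none) ∨
  (∃ r0 rest, sA.2 = r0 :: rest ∧ sB = some (sA.1, pvSel r0 rest))

-- pvApplyA with a positive remainder, guard removed
lemma pvApplyA_pos (total c i j : Int) (s : Int × List (Int × Int × Int))
    (h : 0 < total - 500 * i - 200 * j) :
    pvApplyA total c i j s =
      (if total - 500 * i - 200 * j
            - 100 * min c (PySem.Int.floordiv (total - 500 * i - 200 * j - 1) 100) < s.1 then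
          (total - 500 * i - 200 * j
            - 100 * min c (PySem.Int.floordiv (total - 500 * i - 200 * j - 1) 100),
           [(i, j, min c (PySem.Int.floordiv (total - 500 * i - 200 * j - 1) 100))])
        else if total - 500 * i - 200 * j
            - 100 * min c (PySem.Int.floordiv (total - 500 * i - 200 * j - 1) 100) = s.1 then
          (s.1, s.2 ++ [(i, j, min c (PySem.Int.floordiv (total - 500 * i - 200 * j - 1) 100))])
        else s) := by
  simp only [pvApplyA]
  rw [if_neg (by omega)]

-- the three possible outcomes of one iteration of A's k-loop
lemma pvStepK_noop (total i j k : Int) (s : Int × List (Int × Int × Int))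
    (h : total - (i * 500 + j * 200 + k * 100) ≤ 0) : pvStepK total i j s k = s := by
  simp only [pvStepK]
  split_ifs
  all_goals rfl

lemma pvStepK_lt (total i j k : Int) (s : Int × List (Int × Int × Int))
    (h0 : 0 < total - (i * 500 + j * 200 + k * 100))
    (h1 : total - (i * 500 + j * 200 + k * 100) < s.1)
    (h2 : total - (i * 500 + j * 200 + k * 100) ≤ total) :
    pvStepK total i j s k = (total - (i * 500 + j * 200 + k * 100), [(i, j, k)]) := by
  simp only [pvStepK]; split_ifs <;> first | (exfalso; omega) | simp

lemma pvStepK_eq' (total i j k : Int) (s : Int × List (Int × Int × Int))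
    (h0 : 0 < total - (i * 500 + j * 200 + k * 100))
    (h1 : total - (i * 500 + j * 200 + k * 100) = s.1)
    (h2 : total - (i * 500 + j * 200 + k * 100) ≤ total) :
    pvStepK total i j s k = (total - (i * 500 + j * 200 + k * 100), s.2 ++ [(i, j, k)]) := by
  simp only [pvStepK]; split_ifs <;> first | (exfalso; omega) | rfl

lemma pvStepK_gt (total i j k : Int) (s : Int × List (Int × Int × Int))
    (h1 : s.1 < total - (i * 500 + j * 200 + k * 100)) : pvStepK total i j s k = s := by
  simp only [pvStepK]; split_ifs <;> first | rfl | (exfalso; omega)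

-- A's k-loop from a up computes the closed-form update
lemma pvInnerK_gen (total i j : Int) (hi : 0 ≤ i) (hj : 0 ≤ j) (c : Int) (hc : 0 ≤ c) :
    ∀ (n : Nat) (a : Int) (s : Int × List (Int × Int × Int)), 0 ≤ a → (c + 1 - a).toNat = n →
    (PySem.List.pyRange a (c + 1) 1).foldl (pvStepK total i j) s =
      (if c < a ∨ total - 500 * i - 200 * j ≤ 100 * a then s else pvApplyA total c i j s) := by
  intro n
  induction n with
  | zero =>
    intro a s ha hn
    rw [PySem.List.pyRange_one_eq_nil (by omega), List.foldl_nil, if_pos (Or.inl (by omega))]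
  | succ n ih =>
    intro a s ha hn
    rw [PySem.List.pyRange_one_cons (by omega), List.foldl_cons,
      ih (a + 1) (pvStepK total i j s a) (by omega) (by omega)]
    by_cases hra : total - 500 * i - 200 * j ≤ 100 * a
    · rw [pvStepK_noop total i j a s (by omega), if_pos (by omega), if_pos (by omega)]
    · have h100 : (0 : Int) < 100 := by norm_num
      have hmul := PySem.Int.floordiv_mul_add_mod (total - 500 * i - 200 * j - 1) 100
      have hm0 := PySem.Int.mod_nonneg (total - 500 * i - 200 * j - 1) h100
      have hm1 := PySem.Int.mod_lt (total - 500 * i - 200 * j - 1) h100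
      set q := PySem.Int.floordiv (total - 500 * i - 200 * j - 1) 100 with hqdef
      have hkdef : min c q = c ∨ min c q = q := min_choice c q
      have hk1 : min c q ≤ c := min_le_left c q
      have hk2 : min c q ≤ q := min_le_right c q
      have hak : a ≤ min c q := le_min (by omega) (by omega)
      have hta : total - (i * 500 + j * 200 + a * 100) = total - 500 * i - 200 * j - 100 * a := by
        ring
      by_cases hka : min c q = a
      · -- a is itself the optimal k: the remaining range is a no-op
        rw [if_pos (by omega), if_neg (by omega)]
        rcases lt_trichotomy (total - (i * 500 + j * 200 + a * 100)) s.1 with h1 | h1 | h1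
        · rw [pvStepK_lt total i j a s (by omega) h1 (by omega),
            pvApplyA_pos total c i j s (by omega), ← hqdef, hka]
          split_ifs with hA hB
          · rw [hta]
          · exfalso; omega
          · exfalso; omega
        · rw [pvStepK_eq' total i j a s (by omega) h1 (by omega),
            pvApplyA_pos total c i j s (by omega), ← hqdef, hka]
          split_ifs with hA hB
          · exfalso; omega
          · rw [h1]
          · exfalso; omega
        · rw [pvStepK_gt total i j a s h1,
            pvApplyA_pos total c i j s (by omega), ← hqdef, hka]
          split_ifs with hA hB
          · exfalso; omega
          · exfalso; omega
          · rfl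
      · -- the optimal k lies strictly beyond a; the step at a is absorbed
        rw [if_neg (by omega), if_neg (by omega)]
        rcases lt_trichotomy (total - (i * 500 + j * 200 + a * 100)) s.1 with h1 | h1 | h1
        · rw [pvStepK_lt total i j a s (by omega) h1 (by omega),
            pvApplyA_pos total c i j _ (by omega), pvApplyA_pos total c i j s (by omega),
            ← hqdef]
          dsimp only
          split_ifs with hA hB hC <;> first | rfl | (exfalso; omega)
        · rw [pvStepK_eq' total i j a s (by omega) h1 (by omega),
            pvApplyA_pos total c i j _ (by omega), pvApplyA_pos total c i j s (by omega),
            ← hqdef]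
          dsimp only
          split_ifs with hA hB hC <;> first | rfl | (exfalso; omega)
        · rw [pvStepK_gt total i j a s h1]

lemma pvStepJ_eq_applyA (total c i : Int) (hi : 0 ≤ i) (hc : 0 ≤ c)
    (s : Int × List (Int × Int × Int)) (j : Int) (hj : 0 ≤ j) :
    pvStepJ total c i s j = pvApplyA total c i j s := by
  unfold pvStepJ
  rw [pvInnerK_gen total i j hi hj c hc (c + 1 - 0).toNat 0 s le_rfl rfl]
  by_cases h : total - 500 * i - 200 * j ≤ 0
  · rw [if_pos (by omega)]
    unfold pvApplyA
    rw [if_pos (by omega)]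
  · rw [if_neg (by omega)]

-- B's j-step when the remainder is positive, by the shape of the running best
lemma pvBStepJ_none (c i remi j : Int) (h : 0 < remi - 200 * j) :
    pvBStepJ c i remi none j =
      some (remi - 200 * j - 100 * min c (PySem.Int.floordiv (remi - 200 * j - 1) 100), i, j,
        min c (PySem.Int.floordiv (remi - 200 * j - 1) 100)) := by
  simp only [pvBStepJ]
  rw [if_neg (by omega)]

lemma pvBStepJ_some' (c i remi j : Int) (b : Int × Int × Int × Int) (h : 0 < remi - 200 * j) :
    pvBStepJ c i remi (some b) j =
      (if remi - 200 * j - 100 * min c (PySem.Int.floordiv (remi - 200 * j - 1) 100) < b.1 ∨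
          (remi - 200 * j - 100 * min c (PySem.Int.floordiv (remi - 200 * j - 1) 100) = b.1 ∧
            i + j + min c (PySem.Int.floordiv (remi - 200 * j - 1) 100) <
              b.2.1 + b.2.2.1 + b.2.2.2) then
        some (remi - 200 * j - 100 * min c (PySem.Int.floordiv (remi - 200 * j - 1) 100), i, j,
          min c (PySem.Int.floordiv (remi - 200 * j - 1) 100))
      else some b) := by
  simp only [pvBStepJ]
  rw [if_neg (by omega)]

lemma pvSel_append (r0 x : Int × Int × Int) (rest : List (Int × Int × Int)) :
    pvSel r0 (rest ++ [x]) = pvPick (pvSel r0 rest) x := by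
  unfold pvSel
  rw [List.foldl_append]
  rfl

-- one (i, j) step preserves the correspondence
lemma pvStep_comm (total c i j : Int) (hi : 0 ≤ i) (hj : 0 ≤ j) (hc : 0 ≤ c)
    (sA : Int × List (Int × Int × Int)) (sB : Option (Int × Int × Int × Int))
    (h : pvInv total sA sB) :
    pvInv total (pvApplyA total c i j sA) (pvBStepJ c i (total - 500 * i) sB j) := by
  by_cases hr : total - 500 * i - 200 * j ≤ 0
  · have hA : pvApplyA total c i j sA = sA := by
      unfold pvApplyA; rw [if_pos hr]
    have hB : pvBStepJ c i (total - 500 * i) sB j = sB := by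
      simp only [pvBStepJ]; rw [if_pos hr]
    rw [hA, hB]; exact h
  · have h100 : (0 : Int) < 100 := by norm_num
    have hmul := PySem.Int.floordiv_mul_add_mod (total - 500 * i - 200 * j - 1) 100
    have hm0 := PySem.Int.mod_nonneg (total - 500 * i - 200 * j - 1) h100
    have hm1 := PySem.Int.mod_lt (total - 500 * i - 200 * j - 1) h100
    set q := PySem.Int.floordiv (total - 500 * i - 200 * j - 1) 100 with hqdef
    have hk1 : min c q ≤ c := min_le_left c q
    have hk2 : min c q ≤ q := min_le_right c q
    have hk0 : 0 ≤ min c q := le_min hc (by omega)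
    have hle : total - 500 * i - 200 * j - 100 * min c q ≤ total := by omega
    rcases h with ⟨h2, h1, h3⟩ | ⟨r0, rest, h2, h3⟩
    · -- no candidate seen yet: sA = (total, []), sB = none
      rw [h3, pvApplyA_pos total c i j sA (by omega),
        pvBStepJ_none c i (total - 500 * i) j (by omega), ← hqdef]
      rcases lt_or_eq_of_le (by omega :
          total - 500 * i - 200 * j - 100 * min c q ≤ sA.1) with hlt | heq
      · rw [if_pos hlt]
        exact Or.inr ⟨(i, j, min c q), [], rfl, rfl⟩
      · rw [if_neg (by omega), if_pos heq]
        refine Or.inr ⟨(i, j, min c q), [], ?_, ?_⟩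
        · rw [h2]
          rfl
        · rw [heq, h2]
          rfl
    · -- running best b = (sA.1, pvSel r0 rest)
      rw [h3, pvApplyA_pos total c i j sA (by omega),
        pvBStepJ_some' c i (total - 500 * i) j _ (by omega), ← hqdef]
      dsimp only
      rcases lt_trichotomy (total - 500 * i - 200 * j - 100 * min c q) sA.1 with h4 | h4 | h4
      · rw [if_pos h4, if_pos (Or.inl h4)]
        exact Or.inr ⟨(i, j, min c q), [], rfl, rfl⟩
      · rw [if_neg (by omega), if_pos h4]
        by_cases h5 : i + j + min c q <
            (pvSel r0 rest).1 + (pvSel r0 rest).2.1 + (pvSel r0 rest).2.2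
        · rw [if_pos (Or.inr ⟨h4, h5⟩)]
          refine Or.inr ⟨r0, rest ++ [(i, j, min c q)], by rw [h2]; rfl, ?_⟩
          rw [pvSel_append]
          unfold pvPick
          rw [if_pos (by omega), h4]
        · rw [if_neg (by omega)]
          refine Or.inr ⟨r0, rest ++ [(i, j, min c q)], by rw [h2]; rfl, ?_⟩
          rw [pvSel_append]
          unfold pvPick
          rw [if_neg (by omega)]
      · rw [if_neg (by omega), if_neg (by omega), if_neg (by omega)]
        exact Or.inr ⟨r0, rest, h2, rfl⟩

-- paired fold preserves any relation preserved stepwise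
lemma pvFold_rel {α β : Type} (R : α → β → Prop) (l : List Int)
    (fA : α → Int → α) (fB : β → Int → β)
    (hstep : ∀ sA sB x, x ∈ l → R sA sB → R (fA sA x) (fB sB x)) :
    ∀ sA sB, R sA sB → R (l.foldl fA sA) (l.foldl fB sB) := by
  induction l with
  | nil => intro sA sB h; exact h
  | cons x xs ih =>
    intro sA sB h
    exact ih (fun a b y hy => hstep a b y (List.mem_cons_of_mem x hy))
      (fA sA x) (fB sB x) (hstep sA sB x (List.mem_cons_self) h)

lemma pvBStepJ_some (c i remi j : Int) (b : Int × Int × Int × Int) :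
    ∃ b', pvBStepJ c i remi (some b) j = some b' := by
  unfold pvBStepJ
  dsimp only
  split_ifs
  · exact ⟨b, rfl⟩
  · exact ⟨_, rfl⟩
  · exact ⟨b, rfl⟩

lemma pvFold_some (c i remi : Int) (l : List Int) :
    ∀ (b : Int × Int × Int × Int), ∃ b', l.foldl (pvBStepJ c i remi) (some b) = some b' := by
  induction l with
  | nil => intro b; exact ⟨b, rfl⟩
  | cons x xs ih =>
    intro b
    obtain ⟨b', hb'⟩ := pvBStepJ_some c i remi x b
    simpa [hb'] using ih b'

-- each i-step preserves the correspondence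
lemma pvStepI_inv (total twoC c i : Int) (hi : 0 ≤ i) (htw : 0 ≤ twoC) (hc : 0 ≤ c)
    (sA : Int × List (Int × Int × Int)) (sB : Option (Int × Int × Int × Int))
    (h : pvInv total sA sB) :
    pvInv total (pvStepI total twoC c sA i) (pvBStepI total twoC c sB i) := by
  unfold pvStepI pvBStepI
  simp only []
  rw [PySem.List.foldl_congr_mem (PySem.List.pyRange 0 (twoC + 1) 1)
    (pvStepJ total c i) (fun s j => pvApplyA total c i j s) sA
    (fun s x hx => pvStepJ_eq_applyA total c i hi hc s x
      ((PySem.List.mem_pyRange_one.mp hx).1))]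
  exact pvFold_rel (pvInv total) _ _ _
    (fun a b x hx hab => pvStep_comm total c i x hi
      ((PySem.List.mem_pyRange_one.mp hx).1) hc a b hab) sA sB h

-- after the full fold B's best is set (total > 1000, all coupon counts ≥ 0)
lemma pvBStepI_some (total twoC c i : Int) (b : Int × Int × Int × Int) :
    ∃ b', pvBStepI total twoC c (some b) i = some b' := by
  unfold pvBStepI
  exact pvFold_some c i (total - 500 * i) _ b

lemma pvFoldI_some (total twoC c : Int) (l : List Int) :
    ∀ (b : Int × Int × Int × Int),
      ∃ b', l.foldl (pvBStepI total twoC c) (some b) = some b' := by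
  induction l with
  | nil => intro b; exact ⟨b, rfl⟩
  | cons x xs ih =>
    intro b
    obtain ⟨b', hb'⟩ := pvBStepI_some total twoC c x b
    simpa [hb'] using ih b'

lemma pvB_isSome (total f tw oc : Int) (ht : 1000 < total) (hf : 0 ≤ f) (htw : 0 ≤ tw)
    (hoc : 0 ≤ oc) :
    ∃ b, (PySem.List.pyRange 0 (f + 1) 1).foldl (pvBStepI total tw oc) none = some b := by
  rw [PySem.List.pyRange_one_cons (by omega), List.foldl_cons]
  have h0 : pvBStepI total tw oc none 0 =
      (PySem.List.pyRange (0 + 1) (tw + 1) 1).foldl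
        (pvBStepJ oc 0 (total - 500 * 0)) (pvBStepJ oc 0 (total - 500 * 0) none 0) := by
    unfold pvBStepI
    rw [PySem.List.pyRange_one_cons (by omega), List.foldl_cons]
  rw [h0, pvBStepJ_none oc 0 (total - 500 * 0) 0 (by omega)]
  obtain ⟨b, hb⟩ := pvFold_some oc 0 (total - 500 * 0) (PySem.List.pyRange (0 + 1) (tw + 1) 1) _
  rw [hb]
  exact pvFoldI_some total tw oc _ b

lemma pvPick_self (x : Int × Int × Int) : pvPick x x = x := by
  unfold pvPick
  rw [if_neg (by omega)]

theorem selectOptimumCoupon_spec : Claim_equal_selectOptimumCoupon := by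
  intro total f tw oc hdom hpre
  unfold Spec_selectOptimumCoupon selectOptimumCoupon selectOptimumCoupon_alt
  by_cases ht : total ≤ 1000
  · rw [if_pos ht, if_pos ht]
  · rw [if_neg ht, if_neg ht]
    have hf : 0 ≤ f := by rcases hpre with h | ⟨h1, h2, h3⟩ <;> omega
    have htw : 0 ≤ tw := by rcases hpre with h | ⟨h1, h2, h3⟩ <;> omega
    have hoc : 0 ≤ oc := by rcases hpre with h | ⟨h1, h2, h3⟩ <;> omega
    obtain ⟨b, hb⟩ := pvB_isSome total f tw oc (by omega) hf htw hoc
    have hinv : pvInv total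
        ((PySem.List.pyRange 0 (f + 1) 1).foldl (pvStepI total tw oc)
          (total, ([] : List (Int × Int × Int))))
        ((PySem.List.pyRange 0 (f + 1) 1).foldl (pvBStepI total tw oc) none) :=
      pvFold_rel (pvInv total) _ _ _
        (fun a b' x hx hab => pvStepI_inv total tw oc x
          ((PySem.List.mem_pyRange_one.mp hx).1) htw hoc a b' hab)
        _ _ (Or.inl ⟨rfl, rfl, rfl⟩)
    rw [hb] at hinv
    rcases hinv with ⟨_, _, h3⟩ | ⟨r0, rest, h2, h3⟩
    · exact absurd h3 (by simp)
    · simp only []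
      rw [hb, h2]
      simp only []
      injection h3 with h3'
      rw [h3']
      rw [List.foldl_cons, pvPick_self]
      rfl
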